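-- pv_equiv track=rewrite | github.com/mounikakakollu/Programms | python/DynamicProgramming/LongestCommonSubSequence.py | findShortestCommonSuperSequence
-- ===== SOURCE A (Python) =====
-- def findShortestCommonSuperSequence(s1, s2, m, n):
--     if(m<0):
--         return n+1
--     if(n<0):
--         return m+1
--     # if(n<0):
--     #     return m
--     if(s1[m] == s2[n]):
--         return 1 + findShortestCommonSuperSequence(s1, s2, m-1, n-1);
--     else:
--         return 1 + min(findShortestCommonSuperSequence(s1, s2, m, n-1), findShortestCommonSuperSequence(s1, s2, m-1,n))
-- ===== SOURCE B (Python) =====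
-- def findShortestCommonSuperSequence(s1, s2, m, n):
--     # Bottom-up DP over prefix lengths with a rolling row: O(m*n) instead of exponential recursion.
--     if m < 0:
--         return n + 1
--     if n < 0:
--         return m + 1
--     N = n + 1
--     M = m + 1
--     prev = list(range(N + 1))          # row for zero characters of s1
--     for i in range(1, M + 1):
--         cur = [i]
--         for j in range(1, N + 1):
--             if s1[i - 1] == s2[j - 1]:
--                 cur.append(1 + prev[j - 1])
--             else:
--                 cur.append(1 + min(cur[j - 1], prev[j]))
--         prev = cur
--     return prev[N]
-- ===== Notes on version B (the rewrite author's own statement) =====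
-- stated objective: faster
-- what changed: Replaced the exponential top-down recursion with a bottom-up dynamic-programming table over prefix lengths kept as one rolling row.
import Mathlib
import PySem

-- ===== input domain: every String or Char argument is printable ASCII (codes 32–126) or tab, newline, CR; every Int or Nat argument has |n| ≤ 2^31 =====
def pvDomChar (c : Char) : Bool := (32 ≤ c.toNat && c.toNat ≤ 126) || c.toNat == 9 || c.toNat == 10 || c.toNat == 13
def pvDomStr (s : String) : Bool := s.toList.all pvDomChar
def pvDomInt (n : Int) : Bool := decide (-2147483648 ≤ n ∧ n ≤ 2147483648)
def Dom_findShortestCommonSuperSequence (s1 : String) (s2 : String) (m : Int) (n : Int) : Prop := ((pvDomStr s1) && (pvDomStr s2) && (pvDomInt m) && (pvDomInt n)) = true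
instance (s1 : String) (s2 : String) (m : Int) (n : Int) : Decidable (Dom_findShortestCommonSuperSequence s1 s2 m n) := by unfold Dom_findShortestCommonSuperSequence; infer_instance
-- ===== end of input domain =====

-- B replaces A's exponential top-down recursion by a bottom-up DP row (faster, asymptotic).

-- ===== PORT A =====
-- literal port of A's recursion; an out-of-range index (IndexError in Python) is excluded by Pre_
def findShortestCommonSuperSequence (s1 : String) (s2 : String) (m : Int) (n : Int) : Int :=
  if m < 0 then n + 1
  else if n < 0 then m + 1
  else if PySem.Str.pyGet? s1 m = PySem.Str.pyGet? s2 n then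
    1 + findShortestCommonSuperSequence s1 s2 (m - 1) (n - 1)
  else
    1 + min (findShortestCommonSuperSequence s1 s2 m (n - 1))
            (findShortestCommonSuperSequence s1 s2 (m - 1) n)
termination_by ((m + 1).toNat + (n + 1).toNat)
decreasing_by all_goals omega

-- ===== PORT B =====
-- literal port of Source B: rolling-row bottom-up DP; list.append = ++ [·], in-range lookups via pyGetD
def findShortestCommonSuperSequence_alt (s1 : String) (s2 : String) (m : Int) (n : Int) : Int :=
  if m < 0 then n + 1
  else if n < 0 then m + 1
  else
    let N : Int := n + 1
    let M : Int := m + 1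
    let prev0 : List Int := PySem.List.pyRange 0 (N + 1) 1
    let prev := (PySem.List.pyRange 1 (M + 1) 1).foldl (fun prev i =>
      (PySem.List.pyRange 1 (N + 1) 1).foldl (fun cur j =>
        if PySem.Str.pyGet? s1 (i - 1) = PySem.Str.pyGet? s2 (j - 1) then
          cur ++ [1 + PySem.List.pyGetD prev (j - 1) 0]
        else
          cur ++ [1 + min (PySem.List.pyGetD cur (j - 1) 0) (PySem.List.pyGetD prev j 0)]) [i]) prev0
    PySem.List.pyGetD prev N 0

-- ===== PRECONDITION & SPEC =====
-- Pre_ excludes exactly the inputs where Python A raises IndexError: 0 ≤ m,n with m or n out of range of its string.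
def Pre_findShortestCommonSuperSequence (s1 : String) (s2 : String) (m : Int) (n : Int) : Prop :=
  m < 0 ∨ n < 0 ∨ (m < (s1.toList.length : Int) ∧ n < (s2.toList.length : Int))
instance (s1 : String) (s2 : String) (m : Int) (n : Int) : Decidable (Pre_findShortestCommonSuperSequence s1 s2 m n) := by unfold Pre_findShortestCommonSuperSequence; infer_instance
def pvWitness_findShortestCommonSuperSequence : String × String × Int × Int := ("ab", "cb", 1, 1)

def Spec_findShortestCommonSuperSequence (s1 : String) (s2 : String) (m : Int) (n : Int) (out : Int) : Prop := out = findShortestCommonSuperSequence_alt s1 s2 m n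
instance (s1 : String) (s2 : String) (m : Int) (n : Int) (out : Int) : Decidable (Spec_findShortestCommonSuperSequence s1 s2 m n out) := by unfold Spec_findShortestCommonSuperSequence; infer_instance

-- ===== CLAIM (what is proved, stated in full; the proofs are below) =====
def Claim_equal_findShortestCommonSuperSequence : Prop := ∀ (s1 : String) (s2 : String) (m : Int) (n : Int), Dom_findShortestCommonSuperSequence s1 s2 m n → Pre_findShortestCommonSuperSequence s1 s2 m n → Spec_findShortestCommonSuperSequence s1 s2 m n (findShortestCommonSuperSequence s1 s2 m n)

-- ===== LEMMAS AND PROOFS =====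

theorem F_neg_left (s1 s2 : String) (m n : Int) (hm : m < 0) :
    findShortestCommonSuperSequence s1 s2 m n = n + 1 := by
  rw [findShortestCommonSuperSequence]; simp [hm]

theorem F_neg_right (s1 s2 : String) (m n : Int) (hm : ¬ m < 0) (hn : n < 0) :
    findShortestCommonSuperSequence s1 s2 m n = m + 1 := by
  rw [findShortestCommonSuperSequence]; simp [hm, hn]

theorem F_step (s1 s2 : String) (m n : Int) (hm : 0 ≤ m) (hn : 0 ≤ n) :
    findShortestCommonSuperSequence s1 s2 m n =
      if PySem.Str.pyGet? s1 m = PySem.Str.pyGet? s2 n then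
        1 + findShortestCommonSuperSequence s1 s2 (m - 1) (n - 1)
      else
        1 + min (findShortestCommonSuperSequence s1 s2 m (n - 1))
                (findShortestCommonSuperSequence s1 s2 (m - 1) n) := by
  rw [findShortestCommonSuperSequence]
  simp [show ¬ m < 0 by omega, show ¬ n < 0 by omega]

-- the inner loop: starting from [i], after processing j = 1 .. t it holds the row entries F (i-1) (j-1) for j = 0 .. t
theorem inner_inv (s1 s2 : String) (i : Int) (hi : 1 ≤ i) (N : Int) (prev : List Int)
    (hprev : ∀ j : Nat, (j : Int) ≤ N →
      prev.getD j 0 = findShortestCommonSuperSequence s1 s2 (i - 2) ((j : Int) - 1)) :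
    ∀ t : Nat, (t : Int) ≤ N →
      (PySem.List.pyRange 1 ((t : Int) + 1) 1).foldl (fun cur j =>
        if PySem.Str.pyGet? s1 (i - 1) = PySem.Str.pyGet? s2 (j - 1) then
          cur ++ [1 + PySem.List.pyGetD prev (j - 1) 0]
        else
          cur ++ [1 + min (PySem.List.pyGetD cur (j - 1) 0) (PySem.List.pyGetD prev j 0)]) [i]
      = (List.range (t + 1)).map
          (fun j : Nat => findShortestCommonSuperSequence s1 s2 (i - 1) ((j : Int) - 1)) := by
  intro t
  induction t with
  | zero =>
    intro _
    rw [PySem.List.pyRange_one_eq_nil (by omega)]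
    simp [List.range_succ, F_neg_right s1 s2 (i-1) (-1) (by omega) (by omega)]
  | succ t ih =>
    intro ht
    have ht' : (t : Int) ≤ N := by push_cast at ht; omega
    have hc : (((t + 1 : Nat)) : Int) + 1 = ((t : Int) + 1) + 1 := by push_cast; ring
    rw [hc, PySem.List.pyRange_one_succ_right (by omega), List.foldl_append, ih ht']
    simp only [List.foldl_cons, List.foldl_nil]
    have hcond : (t : Int) + 1 - 1 = (t : Int) := by ring
    rw [show List.range (t + 1 + 1) = List.range (t + 1) ++ [t + 1] from List.range_succ,
        List.map_append]
    simp only [List.map_cons, List.map_nil]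
    rw [hcond]
    have hget1 : PySem.List.pyGetD prev (t : Int) 0
        = findShortestCommonSuperSequence s1 s2 (i - 2) ((t : Int) - 1) := by
      rw [PySem.List.pyGetD_natCast]; exact hprev t ht'
    have hget2 : PySem.List.pyGetD prev ((t : Int) + 1) 0
        = findShortestCommonSuperSequence s1 s2 (i - 2) ((t : Int)) := by
      rw [show (t : Int) + 1 = (((t + 1 : Nat)) : Int) by push_cast; ring, PySem.List.pyGetD_natCast]
      have hcast : ((t + 1 : Nat) : Int) - 1 = (t : Int) := by push_cast; ring
      rw [hprev (t + 1) (by push_cast at ht ⊢; omega), hcast]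
    have hget3 : PySem.List.pyGetD
        ((List.range (t + 1)).map
          (fun j : Nat => findShortestCommonSuperSequence s1 s2 (i - 1) ((j : Int) - 1))) (t : Int) 0
        = findShortestCommonSuperSequence s1 s2 (i - 1) ((t : Int) - 1) := by
      rw [PySem.List.pyGetD_natCast, List.getD_eq_getElem?_getD, List.getElem?_map,
          List.getElem?_range (Nat.lt_succ_self t)]
      rfl
    have hF : findShortestCommonSuperSequence s1 s2 (i - 1) ((((t + 1 : Nat)) : Int) - 1)
        = if PySem.Str.pyGet? s1 (i - 1) = PySem.Str.pyGet? s2 ((t : Int)) then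
            1 + findShortestCommonSuperSequence s1 s2 (i - 2) ((t : Int) - 1)
          else 1 + min (findShortestCommonSuperSequence s1 s2 (i - 1) ((t : Int) - 1))
                       (findShortestCommonSuperSequence s1 s2 (i - 2) ((t : Int))) := by
      rw [show ((((t + 1 : Nat)) : Int) - 1) = (t : Int) by push_cast; ring,
          F_step s1 s2 (i - 1) (t : Int) (by omega) (by omega)]
      simp only [show i - 1 - 1 = i - 2 by ring]
    split_ifs with h
    · congr 1
      rw [hget1, hF, if_pos h]
    · congr 1
      rw [hget2, hget3, hF, if_neg h]

-- the outer loop: after processing i = 1 .. u the rolling row holds F (u-1) (j-1) for j = 0 .. N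
theorem outer_inv (s1 s2 : String) (n : Int) (hn : 0 ≤ n) :
    ∀ u : Nat,
      ((PySem.List.pyRange 1 ((u : Int) + 1) 1).foldl (fun prev i =>
        (PySem.List.pyRange 1 ((n + 1) + 1) 1).foldl (fun cur j =>
          if PySem.Str.pyGet? s1 (i - 1) = PySem.Str.pyGet? s2 (j - 1) then
            cur ++ [1 + PySem.List.pyGetD prev (j - 1) 0]
          else
            cur ++ [1 + min (PySem.List.pyGetD cur (j - 1) 0) (PySem.List.pyGetD prev j 0)]) [i])
        (PySem.List.pyRange 0 ((n + 1) + 1) 1))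
      = (List.range ((n + 1).toNat + 1)).map
          (fun j : Nat => findShortestCommonSuperSequence s1 s2 ((u : Int) - 1) ((j : Int) - 1)) := by
  intro u
  induction u with
  | zero =>
    have hz : PySem.List.pyRange 1 (((0 : Nat) : Int) + 1) 1 = [] :=
      PySem.List.pyRange_one_eq_nil (by simp)
    rw [hz]
    simp only [List.foldl_nil]
    rw [PySem.List.pyRange_one]
    have hlen : ((n + 1) + 1 - 0).toNat = (n + 1).toNat + 1 := by omega
    rw [hlen]
    apply List.map_congr_left
    intro j _
    rw [F_neg_left s1 s2 _ _ (by norm_num)]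
    ring
  | succ u ih =>
    have hc : (((u + 1 : Nat)) : Int) + 1 = ((u : Int) + 1) + 1 := by push_cast; ring
    rw [hc, PySem.List.pyRange_one_succ_right (a := 1) (b := (u : Int) + 1) (by omega),
        List.foldl_append, ih]
    simp only [List.foldl_cons, List.foldl_nil]
    have hrange : (n + 1) + 1 = (((n + 1).toNat : Int)) + 1 := by omega
    rw [hrange, inner_inv s1 s2 ((u : Int) + 1) (by omega) (((n + 1).toNat : Int)) _
      (fun j hj => by
        have hj' : j < (n + 1).toNat + 1 := by omega
        rw [List.getD_eq_getElem?_getD, List.getElem?_map, List.getElem?_range hj']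
        simp only [Option.map_some, Option.getD_some]
        congr 1
        ring)
      ((n + 1).toNat) (le_refl _)]
    apply List.map_congr_left
    intro j _
    have huc : (u : Int) + 1 - 1 = ((u + 1 : Nat) : Int) - 1 := by push_cast; ring
    rw [huc]

-- ===== VERDICT (by name: the statement is the Claim_ definition above) =====
theorem findShortestCommonSuperSequence_spec : Claim_equal_findShortestCommonSuperSequence := by
  intro s1 s2 m n _ _
  unfold Spec_findShortestCommonSuperSequence findShortestCommonSuperSequence_alt
  by_cases hm : m < 0
  · simp [hm, F_neg_left s1 s2 m n hm]
  · by_cases hn : n < 0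
    · simp [hm, hn, F_neg_right s1 s2 m n hm hn]
    · simp only [hm, hn, if_false]
      have hn' : 0 ≤ n := by omega
      have hu : m + 1 + 1 = (((m + 1).toNat : Int)) + 1 := by omega
      rw [hu, outer_inv s1 s2 n hn' ((m + 1).toNat)]
      set a := (n + 1).toNat with ha
      rw [show n + 1 = (a : Int) by omega, PySem.List.pyGetD_natCast,
          List.getD_eq_getElem?_getD, List.getElem?_map, List.getElem?_range (Nat.lt_succ_self a)]
      simp only [Option.map_some, Option.getD_some]
      rw [show (((m + 1).toNat : Int)) - 1 = m by omega, show ((a : Int)) - 1 = n by omega]
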